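-- pv_equiv track=rewrite | github.com/RafiASKing/SixthExperiment | run_tiketa.py | _format_seat_rows
-- ===== SOURCE A (Python) =====
-- from typing import TypedDict, List, Optional, Literal, Annotated, Any
--
-- def _format_seat_rows(seats: Optional[List[str]]) -> List[str]:
--     if not seats:
--         return []
--     rows: dict[str, List[str]] = {}
--     for seat in seats:
--         if not seat:
--             continue
--         row_letter = seat[0]
--         rows.setdefault(row_letter, []).append(seat)
--     formatted = []
--     for row_letter in sorted(rows.keys()):
--         sorted_row = sorted(rows[row_letter], key=lambda x: (len(x), x))
--         formatted.append(f"Baris {row_letter}: {', '.join(sorted_row)}")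
--     return formatted
-- ===== SOURCE B (Python) =====
-- def _format_seat_rows(seats):
--     if seats is None:
--         return []
--     # one global stable two-pass sort: (len, seat) first, then by row letter;
--     # stability makes each row's run already ordered by (len, seat)
--     cleaned = sorted((s for s in seats if s), key=lambda s: (len(s), s))
--     cleaned.sort(key=lambda s: s[0])
--     out = []
--     i, n = 0, len(cleaned)
--     while i < n:
--         letter = cleaned[i][0]
--         j = i
--         while j < n and cleaned[j][0] == letter:
--             j += 1
--         out.append("Baris " + letter + ": " + ", ".join(cleaned[i:j]))
--         i = j
--     return out
-- ===== Notes on version B (the rewrite author's own statement) =====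
-- stated objective: alternative
-- what changed: Replaced A's dict bucketing with one per-row-letter sort each by a two-pass global stable sort ((len, seat) then row letter) followed by a single linear grouping scan that emits each contiguous run.
import Mathlib
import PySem

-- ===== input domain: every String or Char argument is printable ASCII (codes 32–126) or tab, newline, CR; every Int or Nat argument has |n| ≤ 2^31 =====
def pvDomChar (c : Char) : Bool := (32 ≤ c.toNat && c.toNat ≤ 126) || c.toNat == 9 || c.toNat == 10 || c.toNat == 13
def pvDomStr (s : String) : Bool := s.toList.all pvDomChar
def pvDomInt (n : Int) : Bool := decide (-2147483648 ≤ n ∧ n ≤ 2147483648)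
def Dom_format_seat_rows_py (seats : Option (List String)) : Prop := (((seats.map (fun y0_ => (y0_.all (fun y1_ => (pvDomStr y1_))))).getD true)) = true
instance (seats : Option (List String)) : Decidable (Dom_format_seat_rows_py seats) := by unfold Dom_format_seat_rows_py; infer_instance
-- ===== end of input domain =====

-- B replaces A's dict bucketing + one sort per row with two global stable sorts and a single
-- linear grouping scan (objective: alternative decomposition, same return value).

-- seat[0] of a nonempty seat (its row letter); the default ' ' is never reached (callers guard nonemptiness)
def pvHd (s : String) : Char := s.toList.headD ' '

-- "Baris {letter}: {', '.join(row)}"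
def pvFmt (c : Char) (row : List String) : String :=
  "Baris " ++ String.ofList [c] ++ ": " ++ PySem.Str.join ", " row

-- ===== PORT A =====
def format_seat_rows_py (seats : Option (List String)) : List String :=
  match seats with
  | none => []
  | some l =>
    if l.isEmpty then [] else
    let rows : PySem.Dict Char (List String) :=
      l.foldl (fun d seat =>
        if seat.toList.isEmpty then d
        else d.modify (pvHd seat) [] (fun v => v ++ [seat])) PySem.Dict.empty
    (PySem.List.sorted rows.keys (fun c => c) false).foldl (fun acc c =>
      acc ++ [pvFmt c (PySem.List.sorted2 (rows.getD c []) (fun x => PySem.Str.len x) (fun x => x) false)]) []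

-- ===== PORT B =====
-- the outer while loop of Source B: walk one row's contiguous run, emit it, continue after it
def pvGroupFmt : List String → List String
  | [] => []
  | s :: rest =>
    let c := pvHd s
    pvFmt c (s :: rest.takeWhile (fun t => pvHd t == c)) ::
      pvGroupFmt (rest.dropWhile (fun t => pvHd t == c))
termination_by l => l.length
decreasing_by
  simpa using Nat.lt_succ_of_le (List.length_dropWhile_le _ _)

def format_seat_rows_py_alt (seats : Option (List String)) : List String :=
  match seats with
  | none => []
  | some l =>
    let cleaned := PySem.List.sorted2 (l.filter (fun s => !s.toList.isEmpty))
      (fun s => PySem.Str.len s) (fun s => s) false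
    pvGroupFmt (PySem.List.sorted cleaned (fun s => pvHd s) false)

-- ===== PRECONDITION & SPEC =====
def Spec_format_seat_rows_py (seats : Option (List String)) (out : List String) : Prop := out = format_seat_rows_py_alt seats
instance (seats : Option (List String)) (out : List String) : Decidable (Spec_format_seat_rows_py seats out) := by unfold Spec_format_seat_rows_py; infer_instance

-- ===== CLAIM (what is proved, stated in full; the proofs are below) =====
def Claim_equal_format_seat_rows_py : Prop := ∀ (seats : Option (List String)), Dom_format_seat_rows_py seats → Spec_format_seat_rows_py seats (format_seat_rows_py seats)

-- ===== LEMMAS AND PROOFS =====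

-- the composite key (seat[0], len(seat), seat); injective via its third component
def pvK (s : String) : Lex (Char × Lex (Int × String)) :=
  toLex (pvHd s, toLex (PySem.Str.len s, s))

-- (len, seat) — the key of the first sorting pass
def pvK2 (s : String) : Lex (Int × String) := toLex (PySem.Str.len s, s)

lemma pvK_inj : Function.Injective pvK := by
  intro a b h
  unfold pvK at h
  have := congrArg (fun x => (ofLex (ofLex x).2).2) h
  simpa using this

lemma pvKle_iff (a b : String) : pvK a ≤ pvK b ↔
    pvHd a < pvHd b ∨ (pvHd a = pvHd b ∧ pvK2 a ≤ pvK2 b) := by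
  simp [pvK, pvK2, Prod.Lex.le_iff]

-- sorted2 IS sorted with the lexicographic pair key
lemma sorted2_eq_sorted_lex {α κ₁ κ₂ : Type} [LinearOrder κ₁] [LinearOrder κ₂]
    (xs : List α) (k1 : α → κ₁) (k2 : α → κ₂) :
    PySem.List.sorted2 xs k1 k2 false =
      PySem.List.sorted xs (fun x => toLex (k1 x, k2 x)) false := by
  have hbf : (fun (a b : α) => decide (k1 a < k1 b) || (!decide (k1 b < k1 a) && decide (k2 a < k2 b)))
      = (fun (a b : α) => decide (toLex (k1 a, k2 a) < toLex (k1 b, k2 b))) := by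
    funext a b
    have hl : (toLex (k1 a, k2 a) < toLex (k1 b, k2 b)) ↔
        (k1 a < k1 b ∨ (k1 a = k1 b ∧ k2 a < k2 b)) := Prod.Lex.lt_iff
    rcases lt_trichotomy (k1 a) (k1 b) with h | h | h
    · simp [hl, h]
    · simp [Prod.Lex.lt_iff, h]
    · simp [Prod.Lex.lt_iff, lt_asymm h, h.ne', h]
  simp only [PySem.List.sorted2, PySem.List.sorted, Bool.false_eq_true, if_false, hbf]

lemma takeWhile_of_all_false {α : Type} (p : α → Bool) (l : List α)
    (h : ∀ a ∈ l, p a = false) : l.takeWhile p = [] := by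
  cases l with
  | nil => rfl
  | cons x xs => simp [h x (by simp)]

lemma dropWhile_of_all_false {α : Type} (p : α → Bool) (l : List α)
    (h : ∀ a ∈ l, p a = false) : l.dropWhile p = l := by
  cases l with
  | nil => rfl
  | cons x xs => simp [h x (by simp)]

-- STABILITY step: inserting x by strict row-letter order into a pvK-sorted list keeps it
-- pvK-sorted, provided every element with x's letter already there has pvK2 ≤ pvK2 x.
lemma insertBy_hd_pairwise (x : String) (acc : List String)
    (hacc : acc.Pairwise (fun a b => pvK a ≤ pvK b))
    (hmem : ∀ y ∈ acc, pvHd y = pvHd x → pvK2 y ≤ pvK2 x) :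
    (PySem.List.insertBy (fun a b => decide (pvHd a < pvHd b)) x acc).Pairwise
      (fun a b => pvK a ≤ pvK b) := by
  induction acc with
  | nil => simp [PySem.List.insertBy]
  | cons y ys ih =>
    rw [List.pairwise_cons] at hacc
    by_cases h : pvHd x < pvHd y
    · simp only [PySem.List.insertBy, decide_eq_true_eq, if_pos h]
      refine List.Pairwise.cons ?_ (List.Pairwise.cons hacc.1 hacc.2)
      intro z hz
      rcases List.mem_cons.1 hz with hz | hz
      · subst hz; exact (pvKle_iff _ _).2 (Or.inl h)
      · have hyz : pvHd y ≤ pvHd z := by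
          rcases (pvKle_iff _ _).1 (hacc.1 z hz) with h' | h'
          · exact le_of_lt h'
          · exact le_of_eq h'.1
        exact (pvKle_iff _ _).2 (Or.inl (lt_of_lt_of_le h hyz))
    · simp only [PySem.List.insertBy, decide_eq_true_eq, if_neg h]
      refine List.Pairwise.cons ?_ (ih hacc.2 (fun z hz => hmem z (by simp [hz])))
      intro z hz
      rcases (PySem.List.mem_insertBy _ _ _ _).1 hz with hz | hz
      · subst hz
        rcases lt_or_eq_of_le (not_lt.1 h) with h' | h'
        · exact (pvKle_iff _ _).2 (Or.inl h')
        · exact (pvKle_iff _ _).2 (Or.inr ⟨h', hmem y (by simp) h'⟩)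
      · exact hacc.1 z hz

-- STABILITY of the second pass: sorting a pvK2-ordered list by row letter gives a pvK-ordered list
lemma sorted_hd_pairwise (xs : List String) (h : xs.Pairwise (fun a b => pvK2 a ≤ pvK2 b)) :
    (PySem.List.sorted xs (fun s => pvHd s) false).Pairwise (fun a b => pvK a ≤ pvK b) := by
  rw [PySem.List.sorted_eq_foldl_insertBy]
  induction xs using List.reverseRecOn with
  | nil => simp
  | append_singleton xs x ih =>
    rw [List.pairwise_append] at h
    rw [List.foldl_append]
    simp only [List.foldl_cons, List.foldl_nil]
    refine insertBy_hd_pairwise x _ ?_ ?_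
    · rw [← PySem.List.sorted_eq_foldl_insertBy]
      rw [← PySem.List.sorted_eq_foldl_insertBy] at ih
      exact ih h.1
    · intro y hy _
      have hy' : y ∈ xs := by
        rw [← PySem.List.sorted_eq_foldl_insertBy] at hy
        exact (PySem.List.mem_sorted _ _ _ _).1 hy
      exact h.2.2 y hy' x (by simp)

-- a list is a permutation of its letter-buckets, chunked over its distinct letters
lemma perm_flatMap_buckets (letters : List Char) (ne : List String)
    (hnd : letters.Nodup) (hcov : ∀ s ∈ ne, pvHd s ∈ letters) :
    (letters.flatMap (fun c => ne.filter (fun t => pvHd t == c))).Perm ne := by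
  induction letters generalizing ne with
  | nil =>
    cases ne with
    | nil => simp
    | cons s t => exact absurd (hcov s (by simp)) (by simp)
  | cons c rest ih =>
    rw [List.flatMap_cons]
    rw [List.nodup_cons] at hnd
    have heq : rest.flatMap (fun d => ne.filter (fun t => pvHd t == d)) =
        rest.flatMap (fun d => (ne.filter (fun t => !(pvHd t == c))).filter (fun t => pvHd t == d)) := by
      refine List.flatMap_congr ?_
      intro d hd
      rw [List.filter_filter]
      refine (List.filter_congr ?_).symm
      intro t ht
      by_cases h : pvHd t = d
      · have : d ≠ c := fun hdc => hnd.1 (hdc ▸ hd)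
        simp [h, this]
      · simp [h]
    have hperm : (rest.flatMap (fun d => ne.filter (fun t => pvHd t == d))).Perm
        (ne.filter (fun t => !(pvHd t == c))) := by
      rw [heq]
      refine ih _ hnd.2 ?_
      intro s hs
      rw [List.mem_filter] at hs
      have := hcov s hs.1
      simp only [List.mem_cons] at this
      rcases this with h | h
      · exact absurd h (by simpa using hs.2)
      · exact h
    exact (List.Perm.append_left _ hperm).trans (List.filter_append_perm _ ne)

-- buckets over strictly increasing letters, each pvK2-sorted with the bucket's letter, concatenate pvK-sorted
lemma flatMap_buckets_pairwise (letters : List Char) (f : Char → List String)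
    (hlt : letters.Pairwise (· < ·))
    (hhd : ∀ c ∈ letters, ∀ s ∈ f c, pvHd s = c)
    (hin : ∀ c ∈ letters, (f c).Pairwise (fun a b => pvK2 a ≤ pvK2 b)) :
    (letters.flatMap f).Pairwise (fun a b => pvK a ≤ pvK b) := by
  induction letters with
  | nil => simp
  | cons c rest ih =>
    rw [List.flatMap_cons, List.pairwise_append]
    rw [List.pairwise_cons] at hlt
    refine ⟨?_, ih hlt.2 (fun d hd => hhd d (by simp [hd])) (fun d hd => hin d (by simp [hd])), ?_⟩
    · refine (hin c (by simp)).imp_of_mem ?_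
      intro a b ha hb hab
      have h1 := hhd c (by simp) a ha
      have h2 := hhd c (by simp) b hb
      exact (pvKle_iff _ _).2 (Or.inr ⟨h1.trans h2.symm, hab⟩)
    · intro a ha b hb
      rcases List.mem_flatMap.1 hb with ⟨d, hd, hbd⟩
      have h1 := hhd c (by simp) a ha
      have h2 := hhd d (by simp [hd]) b hbd
      exact (pvKle_iff _ _).2 (Or.inl (by rw [h1, h2]; exact hlt.1 d hd))

-- pointwise permutation of the chunks
lemma flatMap_perm_of_perm (letters : List Char) (f g : Char → List String)
    (h : ∀ c ∈ letters, (f c).Perm (g c)) :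
    (letters.flatMap f).Perm (letters.flatMap g) := by
  induction letters with
  | nil => simp
  | cons c rest ih =>
    rw [List.flatMap_cons, List.flatMap_cons]
    exact (h c (by simp)).append (ih (fun d hd => h d (by simp [hd])))

-- pvGroupFmt on a concatenation of nonempty single-letter runs over strictly increasing letters
lemma pvGroupFmt_flatMap (letters : List Char) (f : Char → List String)
    (hlt : letters.Pairwise (· < ·))
    (hhd : ∀ c ∈ letters, ∀ s ∈ f c, pvHd s = c)
    (hne : ∀ c ∈ letters, f c ≠ []) :
    pvGroupFmt (letters.flatMap f) = letters.map (fun c => pvFmt c (f c)) := by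
  induction letters with
  | nil => simp [pvGroupFmt]
  | cons c rest ih =>
    rw [List.flatMap_cons]
    rw [List.pairwise_cons] at hlt
    obtain ⟨s, bs, hfc⟩ : ∃ s bs, f c = s :: bs := by
      cases h : f c with
      | nil => exact absurd h (hne c (by simp))
      | cons s bs => exact ⟨s, bs, rfl⟩
    have hsc : pvHd s = c := hhd c (by simp) s (by simp [hfc])
    have hbs : ∀ t ∈ bs, (pvHd t == c) = true := fun t ht => by
      simpa using hhd c (by simp) t (by simp [hfc, ht])
    have hrest : ∀ t ∈ rest.flatMap f, (pvHd t == c) = false := by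
      intro t ht
      rcases List.mem_flatMap.1 ht with ⟨d, hd, htd⟩
      have : pvHd t = d := hhd d (by simp [hd]) t htd
      have hcd : c ≠ d := ne_of_lt (hlt.1 d hd)
      simp [this, hcd.symm]
    rw [hfc, List.cons_append, pvGroupFmt]
    simp only [hsc]
    rw [List.takeWhile_append_of_pos hbs, takeWhile_of_all_false _ _ hrest,
        List.dropWhile_append_of_pos hbs, dropWhile_of_all_false _ _ hrest]
    rw [ih hlt.2 (fun d hd => hhd d (by simp [hd])) (fun d hd => hne d (by simp [hd]))]
    simp [hfc]

-- the core equality, for a plain list of seats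
lemma core_eq (l : List String) :
    format_seat_rows_py (some l) = format_seat_rows_py_alt (some l) := by
  by_cases hl : l.isEmpty
  · have : l = [] := by simpa using hl
    subst this
    simp [format_seat_rows_py, format_seat_rows_py_alt, PySem.List.sorted2,
      PySem.List.sorted, pvGroupFmt]
  · set ne := l.filter (fun s => !s.toList.isEmpty) with hne_def
    -- rewrite A's dict-building fold as a fold over ne
    have hfold : l.foldl (fun d seat =>
        if seat.toList.isEmpty then d
        else d.modify (pvHd seat) [] (fun v => v ++ [seat])) PySem.Dict.empty
        = ne.foldl (fun d seat => d.modify (pvHd seat) [] (fun v => v ++ [seat])) PySem.Dict.empty := by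
      rw [hne_def, ← PySem.List.foldl_if_eq_foldl_filter]
      refine PySem.List.foldl_congr_mem _ _ _ _ ?_
      intro d s _
      by_cases h : s.toList.isEmpty <;> simp [h]
    set rows := ne.foldl (fun d seat => d.modify (pvHd seat) [] (fun v => v ++ [seat]))
      (PySem.Dict.empty : PySem.Dict Char (List String)) with hrows_def
    have hkeys : rows.keys = PySem.Set.ofList (ne.map pvHd) := by
      rw [hrows_def]
      rw [PySem.Dict.keys_foldl_modify_key ne pvHd [] (fun _ x => fun v => v ++ [x]) PySem.Dict.empty]
      rfl
    have hbucket : ∀ c, rows.getD c [] = ne.filter (fun t => pvHd t == c) := by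
      intro c
      rw [hrows_def]
      have : ne.foldl (fun d seat => d.modify (pvHd seat) [] (fun v => v ++ [seat]))
          (PySem.Dict.empty : PySem.Dict Char (List String))
          = (ne.map (fun s => (pvHd s, s))).foldl
              (fun d p => d.modify p.1 [] (fun v => v ++ [p.2])) PySem.Dict.empty := by
        rw [List.foldl_map]
      rw [this, PySem.Dict.getD_foldl_modify_append]
      simp [List.filter_map, Function.comp_def, List.map_map]
    set letters := PySem.List.sorted rows.keys (fun c => c) false with hletters_def
    have hlt : letters.Pairwise (· < ·) := by
      rw [hletters_def, hkeys]
      exact PySem.List.sorted_ofList_pairwise_lt _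
    have hmem_letters : ∀ c, c ∈ letters ↔ c ∈ ne.map pvHd := by
      intro c
      rw [hletters_def, hkeys, PySem.List.mem_sorted, PySem.Set.mem_ofList]
    -- the buckets, sorted by (len, seat)
    set f : Char → List String := fun c =>
      PySem.List.sorted2 (ne.filter (fun t => pvHd t == c)) (fun x => PySem.Str.len x) (fun x => x) false
      with hf_def
    have hf_sorted : ∀ c, f c = PySem.List.sorted (ne.filter (fun t => pvHd t == c)) pvK2 false := by
      intro c
      simp only [hf_def]
      rw [sorted2_eq_sorted_lex]
      rfl
    have hf_mem : ∀ c, ∀ s, s ∈ f c → s ∈ ne.filter (fun t => pvHd t == c) := by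
      intro c s hs
      rw [hf_sorted] at hs
      exact (PySem.List.mem_sorted _ _ _ _).1 hs
    have hf_hd : ∀ c ∈ letters, ∀ s ∈ f c, pvHd s = c := by
      intro c _ s hs
      have := hf_mem c s hs
      simp only [List.mem_filter, beq_iff_eq] at this
      exact this.2
    have hf_ne : ∀ c ∈ letters, f c ≠ [] := by
      intro c hc
      rcases List.mem_map.1 ((hmem_letters c).1 hc) with ⟨s, hs, hsc⟩
      have : s ∈ ne.filter (fun t => pvHd t == c) := by
        simp [List.mem_filter, hs, hsc]
      intro hnil
      have hp := ((hf_sorted c) ▸ PySem.List.sorted_perm (ne.filter (fun t => pvHd t == c)) pvK2 false)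
      rw [hnil] at hp
      exact absurd (hp.symm.mem_iff.1 this) (by simp)
    have hf_pair : ∀ c ∈ letters, (f c).Pairwise (fun a b => pvK2 a ≤ pvK2 b) := by
      intro c _
      rw [hf_sorted]
      exact PySem.List.sorted_pairwise _ _
    -- B's grouped list equals the concatenation of the buckets
    have hmain : PySem.List.sorted
        (PySem.List.sorted2 ne (fun s => PySem.Str.len s) (fun s => s) false)
        (fun s => pvHd s) false = letters.flatMap f := by
      refine PySem.List.eq_of_perm_of_pairwise_le_of_injective pvK pvK_inj ?_ ?_ ?_
      · have h1 : (letters.flatMap f).Perm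
            (letters.flatMap (fun c => ne.filter (fun t => pvHd t == c))) :=
          flatMap_perm_of_perm letters f (fun c => ne.filter (fun t => pvHd t == c))
            (fun c _ => by rw [hf_sorted]; exact PySem.List.sorted_perm _ _ _)
        have h2 := perm_flatMap_buckets letters ne hlt.nodup
          (fun s hs => (hmem_letters _).2 (List.mem_map_of_mem hs))
        exact ((PySem.List.sorted_perm _ _ _).trans (PySem.List.sorted2_perm _ _ _ _)).trans
          (h1.trans h2).symm
      · refine sorted_hd_pairwise _ ?_
        have : PySem.List.sorted2 ne (fun s => PySem.Str.len s) (fun s => s) false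
            = PySem.List.sorted ne pvK2 false := by
          rw [sorted2_eq_sorted_lex]; rfl
        rw [this]
        exact PySem.List.sorted_pairwise _ _
      · exact flatMap_buckets_pairwise letters f hlt hf_hd hf_pair
    -- assemble
    show (if l.isEmpty then [] else _) = _
    rw [if_neg hl]
    simp only [format_seat_rows_py_alt]
    rw [hfold]
    rw [PySem.List.foldl_append_singleton_eq_map]
    rw [hmain, pvGroupFmt_flatMap letters f hlt hf_hd hf_ne]
    simp only [List.nil_append]
    exact List.map_congr_left (fun c _ => by rw [hbucket c])

-- ===== VERDICT (by name: the statement is the Claim_ definition above) =====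
theorem format_seat_rows_py_spec : Claim_equal_format_seat_rows_py := by
  intro seats _
  show format_seat_rows_py seats = format_seat_rows_py_alt seats
  cases seats with
  | none => rfl
  | some l => exact core_eq l
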